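-- pv_equiv track=rewrite | github.com/Bogdy3145/MainProjects | FP/Assignment2/assignment_2.py | property2
-- ===== SOURCE A (Python) =====
-- def get_real(lis,i):
--     return lis[i][0]
--
-- def get_imaginary(lis,i):
--     return lis[i][1]
--
-- def sum(lis,i,j):
--
--
--     s1=get_real(lis,i)+get_real(lis,i+1)
--     s2=get_imaginary(lis,i)+get_imaginary(lis,j)
--
--     return s1,s2
--
-- def property2(lis):
--
--     k=2
--     maxim=0
--     s=0
--     real_sum,imaginary_sum=sum(lis,0,1)
--
--     for i in range (1,len(lis)-1):
--         nd_real_sum,nd_imaginary_sum=sum(lis,i,i+1)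
--         if real_sum==nd_real_sum and imaginary_sum==nd_imaginary_sum:
--             k=k+1
--         else:
--             if k>maxim:
--                 maxim=k
--                 pos=i+1
--             k=2
--         real_sum=nd_real_sum
--         imaginary_sum=nd_imaginary_sum
--
--     if k > maxim:
--         maxim = k
--         pos = len(lis)
--
--     return maxim,pos
-- ===== SOURCE B (Python) =====
-- def property2(lis):
--     # pair-sum sequence, then run-length-encode it; first strictly-longest run wins
--     p = [(lis[i][0] + lis[i + 1][0], lis[i][1] + lis[i + 1][1]) for i in range(len(lis) - 1)]
--     maxim, pos = 0, None
--     i = 0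
--     while i < len(p):
--         j = i + 1
--         while j < len(p) and p[j] == p[i]:
--             j += 1
--         k = j - i + 1
--         if k > maxim:
--             maxim, pos = k, j + 1
--         i = j
--     return maxim, pos
-- ===== Notes on version B (the rewrite author's own statement) =====
-- stated objective: alternative
-- what changed: Instead of A's single stateful scan with a run counter, running max and leftover final-if, B materialises the list of consecutive pair-sums and run-length-encodes it with a two-pointer scan, keeping the first strictly-longest run.
import Mathlib
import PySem

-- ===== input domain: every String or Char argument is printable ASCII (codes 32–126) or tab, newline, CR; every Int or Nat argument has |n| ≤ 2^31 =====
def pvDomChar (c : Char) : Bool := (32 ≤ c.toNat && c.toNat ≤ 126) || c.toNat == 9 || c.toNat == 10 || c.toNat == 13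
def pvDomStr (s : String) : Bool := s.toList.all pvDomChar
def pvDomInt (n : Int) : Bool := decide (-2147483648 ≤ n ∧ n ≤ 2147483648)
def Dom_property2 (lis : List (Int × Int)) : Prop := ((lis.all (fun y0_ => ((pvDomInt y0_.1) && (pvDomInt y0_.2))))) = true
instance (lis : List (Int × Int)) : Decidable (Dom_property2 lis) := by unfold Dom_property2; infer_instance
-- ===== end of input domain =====

-- B re-implements A by materialising the consecutive pair-sum list and run-length-encoding it
-- with an explicit two-pointer scan (objective: alternative decomposition, same cost);
-- return values agree on lists of length ≥ 2, neither version mutates its argument.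

-- ===== PORT A =====
def get_real (lis : List (Int × Int)) (i : Int) : Int :=
  (PySem.List.pyGetD lis i (0, 0)).1

def get_imaginary (lis : List (Int × Int)) (i : Int) : Int :=
  (PySem.List.pyGetD lis i (0, 0)).2

def sumA (lis : List (Int × Int)) (i j : Int) : Int × Int :=
  (get_real lis i + get_real lis (i + 1), get_imaginary lis i + get_imaginary lis j)

-- the loop body of A, factored as a helper (state = (k, maxim, pos, (real_sum, imaginary_sum)));
-- Python's unbound 'pos' is ported as initial 0: on every input admitted by Pre_ it is
-- assigned before being read, so the value is never observed.
def stepA (lis : List (Int × Int)) (st : Int × Int × Int × (Int × Int)) (i : Int) :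
    Int × Int × Int × (Int × Int) :=
  match st with
  | (k, maxim, pos, rs) =>
    let nd := sumA lis i (i + 1)
    if rs = nd then (k + 1, maxim, pos, nd)
    else if k > maxim then (2, k, i + 1, nd)
    else (2, maxim, pos, nd)

def property2 (lis : List (Int × Int)) : Int × Int :=
  let n : Int := lis.length
  let st := (PySem.List.pyRange 1 (n - 1) 1).foldl (stepA lis) (2, 0, 0, sumA lis 0 1)
  match st with
  | (k, maxim, pos, _) => if k > maxim then (k, n) else (maxim, pos)

-- ===== PORT B =====
-- p = [(lis[i][0]+lis[i+1][0], lis[i][1]+lis[i+1][1]) for i in range(len(lis)-1)]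
def pairsB (lis : List (Int × Int)) : List (Int × Int) :=
  (PySem.List.pyRange 0 ((lis.length : Int) - 1) 1).map (fun i =>
    ((PySem.List.pyGetD lis i (0, 0)).1 + (PySem.List.pyGetD lis (i + 1) (0, 0)).1,
     (PySem.List.pyGetD lis i (0, 0)).2 + (PySem.List.pyGetD lis (i + 1) (0, 0)).2))

-- inner while loop of Source B: advance j while j < len(p) and p[j] == p[i]
def innerB (p : List (Int × Int)) (x : Int × Int) (j : Nat) : Nat :=
  if h : j < p.length ∧ p.getD j (0, 0) = x then innerB p x (j + 1) else j
termination_by p.length - j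
decreasing_by omega

-- needed by outerB's termination proof (cited in its decreasing_by)
theorem innerB_ge (p : List (Int × Int)) (x : Int × Int) (j : Nat) : j ≤ innerB p x j := by
  unfold innerB
  split
  · have := innerB_ge p x (j + 1); omega
  · exact Nat.le_refl j
termination_by p.length - j
decreasing_by omega

-- outer while loop of Source B over run starts; Python's 'pos = None' is ported as initial 0:
-- under Pre_ the first run always overwrites it, so the value is never observed.
def outerB (p : List (Int × Int)) (i : Nat) (maxim pos : Int) : Int × Int :=
  if h : i < p.length then
    let j := innerB p (p.getD i (0, 0)) (i + 1)
    let k : Int := (j : Int) - (i : Int) + 1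
    if k > maxim then outerB p j k ((j : Int) + 1) else outerB p j maxim pos
  else (maxim, pos)
termination_by p.length - i
decreasing_by
  · have := innerB_ge p (p.getD i (0, 0)) (i + 1); omega
  · have := innerB_ge p (p.getD i (0, 0)) (i + 1); omega

def property2_alt (lis : List (Int × Int)) : Int × Int :=
  outerB (pairsB lis) 0 0 0

-- ===== PRECONDITION & SPEC =====
-- Pre_ excludes lists of length < 2, on which Python A raises IndexError (in sum(lis,0,1)).
def Pre_property2 (lis : List (Int × Int)) : Prop := 2 ≤ lis.length
instance (lis : List (Int × Int)) : Decidable (Pre_property2 lis) := by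
  unfold Pre_property2; infer_instance

def pvWitness_property2 : (List (Int × Int)) := [(0, 0), (1, 1)]

def Spec_property2 (lis : List (Int × Int)) (out : Int × Int) : Prop := out = property2_alt lis
instance (lis : List (Int × Int)) (out : Int × Int) : Decidable (Spec_property2 lis out) := by
  unfold Spec_property2; infer_instance

-- ===== CLAIM (what is proved, stated in full; the proofs are below) =====
def Claim_equal_property2 : Prop :=
  ∀ (lis : List (Int × Int)), Dom_property2 lis → Pre_property2 lis →
    Spec_property2 lis (property2 lis)

-- ===== LEMMAS AND PROOFS =====

-- reference loop: A's scan written as structural recursion over the pair-sum list suffix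
def loopA : List (Int × Int) → Int → Int → Int → Int → (Int × Int) → Int × Int
  | [], i, k, maxim, pos, _ => if k > maxim then (k, i + 1) else (maxim, pos)
  | nd :: rest, i, k, maxim, pos, rs =>
    if rs = nd then loopA rest (i + 1) (k + 1) maxim pos nd
    else if k > maxim then loopA rest (i + 1) 2 k (i + 1) nd
    else loopA rest (i + 1) 2 maxim pos nd

-- A's trailing 'if k > maxim' block
def finishA (n : Int) (st : Int × Int × Int × (Int × Int)) : Int × Int :=
  match st with
  | (k, maxim, pos, _) => if k > maxim then (k, n) else (maxim, pos)

theorem pairsB_length (lis : List (Int × Int)) :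
    (pairsB lis).length = ((lis.length : Int) - 1).toNat := by
  simp [pairsB, PySem.List.length_pyRange_one]

theorem sumA_eq (lis : List (Int × Int)) (i : Nat) (h : i + 1 < lis.length) :
    sumA lis (i : Int) ((i : Int) + 1) = (pairsB lis).getD i (0, 0) := by
  unfold pairsB
  have hcast : ((lis.length : Int) - 1) = ((lis.length - 1 : Nat) : Int) := by omega
  rw [hcast, List.getD_eq_getElem?_getD,
      PySem.List.getElem?_map_pyRange_zero _ _ i (by omega)]
  simp [sumA, get_real, get_imaginary]

theorem innerB_stop (p : List (Int × Int)) (x : Int × Int) (j : Nat) :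
    ¬ (innerB p x j < p.length ∧ p.getD (innerB p x j) (0, 0) = x) := by
  unfold innerB
  split
  · exact innerB_stop p x (j + 1)
  · assumption
termination_by p.length - j
decreasing_by omega

-- fast-forward: loopA absorbs a maximal block of elements equal to rs into k
theorem loopA_run (p : List (Int × Int)) (x : Int × Int) (j : Nat) (k maxim pos : Int) :
    loopA (p.drop j) (j : Int) k maxim pos x
      = loopA (p.drop (innerB p x j)) ((innerB p x j : Nat) : Int)
          (k + ((innerB p x j : Int) - (j : Int))) maxim pos x := by
  rw [innerB]
  split
  · rename_i h
    obtain ⟨hj, hx⟩ := h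
    rw [List.drop_eq_getElem_cons hj]
    have hget : p[j] = x := by rw [← hx]; simp [List.getD_eq_getElem?_getD, hj]
    rw [loopA, if_pos hget.symm]
    rw [show ((j:Nat):Int) + 1 = ((j+1 : Nat) : Int) by push_cast; ring]
    rw [hget, loopA_run p x (j+1) (k+1) maxim pos]
    congr 1
    push_cast
    ring
  · simp
termination_by p.length - j
decreasing_by omega

-- B's outer loop computes exactly A's reference scan restarted at each run boundary
theorem outerB_eq_loopA (p : List (Int × Int)) (i : Nat) (maxim pos : Int) :
    outerB p i maxim pos =
      if i < p.length then
        loopA (p.drop (i + 1)) ((i : Int) + 1) 2 maxim pos (p.getD i (0, 0))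
      else (maxim, pos) := by
  rw [outerB]
  split
  · rename_i hi
    dsimp only
    set x := p.getD i (0, 0) with hxdef
    set e := innerB p x (i + 1) with hedef
    have hge : i + 1 ≤ e := innerB_ge p x (i + 1)
    have hstop := innerB_stop p x (i + 1)
    rw [show ((i:Nat):Int) + 1 = ((i+1 : Nat) : Int) by push_cast; ring,
        loopA_run p x (i+1) 2 maxim pos, ← hedef]
    have hk : (2 : Int) + ((e : Int) - ((i+1 : Nat) : Int)) = (e : Int) - (i : Int) + 1 := by
      push_cast; ring
    rw [hk]
    by_cases he : e < p.length
    · -- p[e] ≠ x: loopA closes the run exactly as outerB's branch does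
      have hne : p.getD e (0, 0) ≠ x := fun hc => hstop ⟨he, hc⟩
      rw [List.drop_eq_getElem_cons he, loopA]
      have hget : p[e] = p.getD e (0, 0) := by simp [List.getD_eq_getElem?_getD, he]
      rw [if_neg (show ¬ (x = p[e]) from by rw [hget]; exact fun hc => hne hc.symm)]
      rw [outerB_eq_loopA p e, if_pos he, outerB_eq_loopA p e, if_pos he]
      rw [show ((e:Nat):Int) + 1 = ((e+1 : Nat) : Int) by push_cast; ring, hget]
    · have hdrop : p.drop e = [] := List.drop_eq_nil_of_le (by omega)
      rw [hdrop, loopA]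
      rw [outerB_eq_loopA p e, if_neg he, outerB_eq_loopA p e, if_neg he]
  · rfl
termination_by p.length - i
decreasing_by
  · have := innerB_ge p (p.getD i (0, 0)) (i + 1); omega
  · have := innerB_ge p (p.getD i (0, 0)) (i + 1); omega
  · have := innerB_ge p (p.getD i (0, 0)) (i + 1); omega
  · have := innerB_ge p (p.getD i (0, 0)) (i + 1); omega

-- A's indexed foldl over range(1, len(lis)-1) equals the reference scan over p's suffix
theorem Afold (lis : List (Int × Int)) (hn : 2 ≤ lis.length) (a : Nat)
    (ha1 : 1 ≤ a) (ha2 : a ≤ lis.length - 1) (k maxim pos : Int) (rs : Int × Int) :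
    finishA (lis.length : Int)
      ((PySem.List.pyRange (a : Int) ((lis.length : Int) - 1) 1).foldl (stepA lis)
        (k, maxim, pos, rs))
      = loopA ((pairsB lis).drop a) (a : Int) k maxim pos rs := by
  have hplen : (pairsB lis).length = lis.length - 1 := by
    rw [pairsB_length]; omega
  by_cases hlt : a < lis.length - 1
  · rw [PySem.List.pyRange_one_cons (by omega)]
    rw [List.foldl_cons]
    have ha : a < (pairsB lis).length := by omega
    rw [List.drop_eq_getElem_cons ha, loopA]
    have hget : (pairsB lis)[a] = (pairsB lis).getD a (0, 0) := by
      simp [List.getD_eq_getElem?_getD, ha]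
    have hnd : sumA lis (a : Int) ((a : Int) + 1) = (pairsB lis).getD a (0, 0) :=
      sumA_eq lis a (by omega)
    rw [stepA]
    simp only [hnd]
    have hcast : (a : Int) + 1 = ((a + 1 : Nat) : Int) := by push_cast; ring
    by_cases hrs : rs = (pairsB lis).getD a (0, 0)
    · rw [if_pos hrs, if_pos (show rs = (pairsB lis)[a] from by rw [hget]; exact hrs)]
      rw [hcast, Afold lis hn (a+1) (by omega) (by omega)]
      rw [hget]
    · rw [if_neg hrs, if_neg (show ¬ rs = (pairsB lis)[a] from by rw [hget]; exact hrs)]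
      by_cases hkm : k > maxim
      · rw [if_pos hkm, if_pos hkm, hcast, Afold lis hn (a+1) (by omega) (by omega), hget]
      · rw [if_neg hkm, if_neg hkm, hcast, Afold lis hn (a+1) (by omega) (by omega), hget]
  · have ha : a = lis.length - 1 := by omega
    rw [PySem.List.pyRange_one_eq_nil (by omega)]
    rw [List.foldl_nil]
    have hdrop : (pairsB lis).drop a = [] := List.drop_eq_nil_of_le (by omega)
    rw [hdrop, loopA, finishA]
    have : (a : Int) + 1 = (lis.length : Int) := by omega
    rw [this]
termination_by lis.length - 1 - a
decreasing_by all_goals omega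

-- ===== VERDICT (by name: the statement is the Claim_ definition above) =====
theorem property2_spec : Claim_equal_property2 := by
  intro lis _hdom hpre
  unfold Spec_property2 Pre_property2 at *
  have hn : 2 ≤ lis.length := hpre
  have hA : property2 lis
      = finishA (lis.length : Int)
          ((PySem.List.pyRange 1 ((lis.length : Int) - 1) 1).foldl (stepA lis)
            (2, 0, 0, sumA lis 0 1)) := rfl
  have hs : sumA lis 0 1 = (pairsB lis).getD 0 (0, 0) := by
    have := sumA_eq lis 0 (by omega)
    simpa using this
  have hplen : (pairsB lis).length = lis.length - 1 := by rw [pairsB_length]; omega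
  have hB : property2_alt lis
      = loopA ((pairsB lis).drop 1) 1 2 0 0 ((pairsB lis).getD 0 (0, 0)) := by
    unfold property2_alt
    rw [outerB_eq_loopA (pairsB lis) 0 0 0, if_pos (by omega)]
    norm_num
  have hAf := Afold lis hn 1 (by omega) (by omega) 2 0 0 (sumA lis 0 1)
  norm_num at hAf
  rw [hA, hAf, hB, hs, List.drop_one]
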